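-- pv_equiv track=rewrite | github.com/vkeshari/apple_health | src/parse_data.py | build_csv_dict
-- ===== SOURCE A (Python) =====
-- DATE_FIELD_CSV = 'date'
--
-- def build_csv_dict(records_by_date):
--   fields = [DATE_FIELD_CSV] + sorted(records_by_date.keys())
--
--   data_dict = {}
--   for r in records_by_date:
--     for d in records_by_date[r]:
--       if d not in data_dict:
--         data_dict[d] = {}
--       data_dict[d][r] = records_by_date[r][d]
--
--   return fields, data_dict
-- ===== SOURCE B (Python) =====
-- DATE_FIELD_CSV = 'date'
--
-- def build_csv_dict(records_by_date):
--   fields = [DATE_FIELD_CSV] + sorted(records_by_date.keys())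
--   dates = dict.fromkeys(d for rec in records_by_date.values() for d in rec)
--   data_dict = {d: {r: rec[d] for r, rec in records_by_date.items() if d in rec}
--                for d in dates}
--   return fields, data_dict
-- ===== Notes on version B (the rewrite author's own statement) =====
-- stated objective: alternative
-- what changed: A builds the date-keyed dict incrementally, entry by entry, mutating/creating inner dicts as it scans; B first collects the distinct dates (ordered dedup over all records) and then constructs the result in one date-driven comprehension, looking each date up in every record.
import Mathlib
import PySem

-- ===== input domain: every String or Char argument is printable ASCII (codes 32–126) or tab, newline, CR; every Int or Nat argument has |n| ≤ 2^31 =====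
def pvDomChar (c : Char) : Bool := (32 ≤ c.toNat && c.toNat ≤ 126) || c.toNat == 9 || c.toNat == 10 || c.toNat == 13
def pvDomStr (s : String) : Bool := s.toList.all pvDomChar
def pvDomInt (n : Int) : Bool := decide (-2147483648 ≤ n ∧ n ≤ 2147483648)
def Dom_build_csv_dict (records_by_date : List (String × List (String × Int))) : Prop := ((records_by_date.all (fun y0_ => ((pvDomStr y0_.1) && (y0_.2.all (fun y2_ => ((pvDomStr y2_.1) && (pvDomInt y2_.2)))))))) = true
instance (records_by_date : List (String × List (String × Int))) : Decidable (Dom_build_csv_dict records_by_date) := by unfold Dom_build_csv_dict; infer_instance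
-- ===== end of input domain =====

-- B replaces A's entry-by-entry incremental construction of the pivoted dict by an
-- ordered collection of the distinct dates followed by a date-driven comprehension
-- (objective: alternative decomposition, same cost class).

-- ===== PORT A =====
-- Literal port of A. The dict-of-dicts `data_dict` is a PySem.Dict of PySem.Dicts;
-- it is flattened to the association-list return type at the very end.
-- `records_by_date[r][d]` is the lookup `(Dict.mk p.2).getD q.1 0`, exact here because
-- `d` ranges over that dict's own keys (Python's KeyError is unreachable).
def build_csv_dict (records_by_date : List (String × List (String × Int))) : List String × (List (String × List (String × Int))) :=
  let fields := "date" :: PySem.List.sorted (records_by_date.map Prod.fst) (fun k => k) false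
  let data_dict : PySem.Dict String (PySem.Dict String Int) :=
    records_by_date.foldl (fun dd p =>
      p.2.foldl (fun dd q =>
        let dd := if dd.contains q.1 = false then dd.insert q.1 (PySem.Dict.mk []) else dd
        dd.insert q.1 ((dd.getD q.1 (PySem.Dict.mk [])).insert p.1
          ((PySem.Dict.mk p.2).getD q.1 0))) dd)
      (PySem.Dict.mk [])
  (fields, data_dict.items.map (fun e => (e.1, e.2.items)))

-- ===== PORT B =====
-- Port of B: `dict.fromkeys(...)` is PySem.List.dedup; the nested comprehension is a
-- map over the dates, each inner dict a filterMap over the records.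
def build_csv_dict_alt (records_by_date : List (String × List (String × Int))) : List String × (List (String × List (String × Int))) :=
  let fields := "date" :: PySem.List.sorted (records_by_date.map Prod.fst) (fun k => k) false
  let dates := PySem.List.dedup (records_by_date.flatMap (fun p => p.2.map Prod.fst))
  let data_dict := dates.map (fun d =>
    (d, records_by_date.filterMap (fun p => ((PySem.Dict.mk p.2).get? d).map (fun v => (p.1, v)))))
  (fields, data_dict)

-- ===== PRECONDITION & SPEC =====
-- Pre_ excludes association lists with a duplicated outer or inner key: the Python
-- argument is a dict of dicts, so such lists do not represent any input A can receive.
def Pre_build_csv_dict (records_by_date : List (String × List (String × Int))) : Prop :=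
  (records_by_date.map Prod.fst).Nodup ∧ ∀ p ∈ records_by_date, (p.2.map Prod.fst).Nodup
instance (records_by_date : List (String × List (String × Int))) : Decidable (Pre_build_csv_dict records_by_date) := by unfold Pre_build_csv_dict; infer_instance
def pvWitness_build_csv_dict : (List (String × List (String × Int))) :=
  [("steps", [("2024-01-01", 100)]), ("hr", [("2024-01-01", 60), ("2024-01-02", 61)])]
def Spec_build_csv_dict (records_by_date : List (String × List (String × Int))) (out : List String × (List (String × List (String × Int)))) : Prop := out = build_csv_dict_alt records_by_date
instance (records_by_date : List (String × List (String × Int))) (out : List String × (List (String × List (String × Int)))) : Decidable (Spec_build_csv_dict records_by_date out) := by unfold Spec_build_csv_dict; infer_instance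

-- ===== CLAIM (what is proved, stated in full; the proofs are below) =====
def Claim_equal_build_csv_dict : Prop := ∀ (records_by_date : List (String × List (String × Int))), Dom_build_csv_dict records_by_date → Pre_build_csv_dict records_by_date → Spec_build_csv_dict records_by_date (build_csv_dict records_by_date)

-- ===== LEMMAS AND PROOFS =====

-- B's inner row for a date, B's ordered date list, and the dict A's loop builds, as named functions.
def pvRows (rbd : List (String × List (String × Int))) (d : String) : List (String × Int) :=
  rbd.filterMap (fun p => ((PySem.Dict.mk p.2).get? d).map (fun v => (p.1, v)))

def pvDates (rbd : List (String × List (String × Int))) : List String :=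
  PySem.List.dedup (rbd.flatMap (fun p => p.2.map Prod.fst))

def pvD (rbd : List (String × List (String × Int))) : PySem.Dict String (PySem.Dict String Int) :=
  PySem.Dict.mk ((pvDates rbd).map (fun d => (d, PySem.Dict.mk (pvRows rbd d))))

lemma pvKeys_pvD (rs : List (String × List (String × Int))) : (pvD rs).keys = pvDates rs := by
  show List.map Prod.fst _ = _
  rw [pvD, List.map_map]
  exact List.map_id' _

lemma pvContains_pvD (rs : List (String × List (String × Int))) (k : String) :
    (pvD rs).contains k = (pvDates rs).contains k := by
  refine Bool.eq_iff_iff.mpr ?_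
  rw [PySem.Dict.contains_iff_mem_keys, pvKeys_pvD]
  simp

lemma pvSet_foldl_add (ys : List String) (s : List String) (h : ys.Nodup) :
    ys.foldl PySem.Set.add s = s ++ ys.filter (fun y => !s.contains y) := by
  induction ys generalizing s with
  | nil => simp
  | cons y ys ih =>
    obtain ⟨hy, hys⟩ := List.nodup_cons.mp h
    cases hc : s.contains y with
    | true =>
      simp only [List.foldl_cons, PySem.Set.add, PySem.Set.contains, hc, if_true,
        List.filter_cons, Bool.not_true, Bool.false_eq_true, if_false]
      exact ih s hys
    | false =>
      simp only [List.foldl_cons, PySem.Set.add, PySem.Set.contains, hc,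
        List.filter_cons, Bool.not_false, if_true]
      rw [if_neg (by simp), ih (s ++ [y]) hys]
      simp only [List.append_assoc, List.cons_append, List.nil_append]
      congr 2
      apply List.filter_congr
      intro x hx
      have hne : x ≠ y := fun he => hy (he ▸ hx)
      simp [hne]

lemma pvDates_append (rs : List (String × List (String × Int))) (p : String × List (String × Int))
    (h : (p.2.map Prod.fst).Nodup) :
    pvDates (rs ++ [p]) = pvDates rs ++ (p.2.map Prod.fst).filter (fun x => !(pvDates rs).contains x) := by
  unfold pvDates PySem.List.dedup
  rw [List.flatMap_append, PySem.Set.ofList_eq_foldl, List.foldl_append, ← PySem.Set.ofList_eq_foldl]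
  have : [p].flatMap (fun p => p.2.map Prod.fst) = p.2.map Prod.fst := by simp
  rw [this]
  exact pvSet_foldl_add _ _ h

lemma pvRows_append (rs : List (String × List (String × Int))) (p : String × List (String × Int)) (d : String) :
    pvRows (rs ++ [p]) d = pvRows rs d ++ (((PySem.Dict.mk p.2).get? d).map (fun v => (p.1, v))).toList := by
  unfold pvRows
  rw [List.filterMap_append]
  cases h : (PySem.Dict.mk p.2).get? d <;> simp [h]

lemma pvRows_nil_of_not_mem (rbd : List (String × List (String × Int))) (d : String)
    (h : d ∉ pvDates rbd) : pvRows rbd d = [] := by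
  rw [pvRows, List.filterMap_eq_nil_iff]
  intro p hp
  have hd : d ∉ p.2.map Prod.fst := by
    intro hm
    exact h ((PySem.List.mem_dedup _ _).mpr (List.mem_flatMap.mpr ⟨p, hp, hm⟩))
  have : (PySem.Dict.mk p.2).get? d = none := by
    rw [PySem.Dict.get?_eq_none_iff_not_mem_keys]
    simpa [PySem.Dict.keys_mk] using hd
  simp [this]

def pvStep (r : String) (dd : PySem.Dict String (PySem.Dict String Int)) (q : String × Int) :
    PySem.Dict String (PySem.Dict String Int) :=
  dd.insert q.1 ((dd.getD q.1 (PySem.Dict.mk [])).insert r q.2)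

lemma pvInner_items (r : String) (es : List (String × Int)) (dd : PySem.Dict String (PySem.Dict String Int))
    (hes : (es.map Prod.fst).Nodup) (hdd : dd.keys.Nodup)
    (hfresh : ∀ e ∈ dd.items, e.1 ∈ es.map Prod.fst → e.2.contains r = false) :
    (es.foldl (pvStep r) dd).items =
      dd.items.map (fun e => match (PySem.Dict.mk es).get? e.1 with
          | some v => (e.1, PySem.Dict.mk (e.2.items ++ [(r, v)]))
          | none => e)
      ++ (es.filter (fun q => !(dd.contains q.1))).map (fun q => (q.1, PySem.Dict.mk [(r, q.2)])) := by
  induction es generalizing dd with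
  | nil => simp [PySem.Dict.get?]
  | cons q es ih =>
    rw [List.map_cons] at hes
    obtain ⟨hqes, hes'⟩ := List.nodup_cons.mp hes
    rw [List.foldl_cons]
    cases hc : dd.contains q.1 with
    | true =>
      have hitems : (pvStep r dd q).items
          = dd.items.map (fun p => if p.1 == q.1 then (q.1, (dd.getD q.1 (PySem.Dict.mk [])).insert r q.2) else p) := by
        rw [pvStep, PySem.Dict.items_insert_of_contains _ _ hc]
      have hkeys : (pvStep r dd q).keys = dd.keys := by
        rw [pvStep, PySem.Dict.keys_insert_of_contains _ _ hc]
      have hfresh2 : ∀ e ∈ (pvStep r dd q).items, e.1 ∈ es.map Prod.fst → e.2.contains r = false := by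
        rw [hitems]
        intro e he hmem
        obtain ⟨p, hp, hpe⟩ := List.mem_map.mp he
        by_cases hb : p.1 = q.1
        · exfalso; apply hqes
          have : e.1 = q.1 := by simp [hb] at hpe; simp [← hpe]
          exact this ▸ hmem
        · have : e = p := by simpa [hb] using hpe.symm
          exact this ▸ hfresh p hp (List.mem_cons_of_mem _ ((this ▸ hmem)))
      rw [ih (pvStep r dd q) hes' (hkeys ▸ hdd) hfresh2, hitems]
      rw [List.map_map]
      congr 1
      · -- map part
        apply List.map_congr_left
        intro p hp
        by_cases hb : p.1 = q.1
        · have hmem : (q.1, p.2) ∈ dd.items := by rw [← hb]; exact hp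
          have hinner : dd.getD q.1 (PySem.Dict.mk []) = p.2 :=
            PySem.Dict.getD_of_mem_items dd hmem hdd _
          have hnr : p.2.contains r = false := hfresh p hp (by simp [hb])
          have hins : (p.2.insert r q.2).items = p.2.items ++ [(r, q.2)] :=
            PySem.Dict.items_insert_of_not_contains _ _ hnr
          have hsome : (PySem.Dict.mk (q :: es)).get? q.1 = some q.2 := by
            rcases q with ⟨qk, qv⟩
            rw [PySem.Dict.get?_mk_cons]
            simp
          have hd2 : (p.2.insert r q.2) = PySem.Dict.mk (p.2.items ++ [(r, q.2)]) := by
            apply PySem.Dict.ext; rw [hins]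
          have hnone : (PySem.Dict.mk es).get? q.1 = none := by
            rw [PySem.Dict.get?_eq_none_iff_not_mem_keys]
            simpa [PySem.Dict.keys_mk] using hqes
          simp [Function.comp_apply, hb, hinner, hsome, hd2, hnone]
        · have hgq : (PySem.Dict.mk (q :: es)).get? p.1 = (PySem.Dict.mk es).get? p.1 := by
            rcases q with ⟨qk, qv⟩
            rw [PySem.Dict.get?_mk_cons, if_neg (by simpa using Ne.symm hb)]
          simp only [Function.comp_apply, hgq]
          rw [if_neg (by simp [hb])]
      · -- filter part
        rw [List.filter_cons_of_neg (by simp [hc])]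
        congr 1
        apply List.filter_congr
        intro x hx
        have hne : x.1 ≠ q.1 := fun he => hqes (he ▸ List.mem_map_of_mem hx)
        rw [pvStep, PySem.Dict.contains_insert]
        simp [hne]
    | false =>
      have hg : dd.getD q.1 (PySem.Dict.mk []) = PySem.Dict.mk [] :=
        PySem.Dict.getD_of_not_contains dd _ hc
      have hone : (PySem.Dict.mk [] : PySem.Dict String Int).insert r q.2 = PySem.Dict.mk [(r, q.2)] := by
        simp [PySem.Dict.insert, PySem.Dict.contains]
      have hitems : (pvStep r dd q).items = dd.items ++ [(q.1, PySem.Dict.mk [(r, q.2)])] := by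
        rw [pvStep, hg, hone, PySem.Dict.items_insert_of_not_contains _ _ hc]
      have hknotmem : q.1 ∉ dd.keys := fun hm =>
        by simp [(PySem.Dict.contains_iff_mem_keys dd q.1).mpr hm] at hc
      have hkeys : (pvStep r dd q).keys = dd.keys ++ [q.1] := by
        rw [pvStep, PySem.Dict.keys_insert_of_not_contains _ _ hc]
      have hfresh2 : ∀ e ∈ (pvStep r dd q).items, e.1 ∈ es.map Prod.fst → e.2.contains r = false := by
        rw [hitems]
        intro e he hmem
        rcases List.mem_append.mp he with h1 | h1
        · exact hfresh e h1 (List.mem_cons_of_mem _ hmem)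
        · exfalso; apply hqes
          have : e = (q.1, PySem.Dict.mk [(r, q.2)]) := by simpa using h1
          exact (by simp [this] at hmem ⊢; exact hmem)
      have hnodup2 : (pvStep r dd q).keys.Nodup := by
        rw [hkeys, List.nodup_append]
        refine ⟨hdd, List.nodup_singleton _, ?_⟩
        intro a ha b hb
        simp only [List.mem_singleton] at hb
        subst hb
        exact fun he => hknotmem (he ▸ ha)
      rw [ih (pvStep r dd q) hes' hnodup2 hfresh2, hitems]
      rw [List.map_append]
      have hnone : (PySem.Dict.mk es).get? q.1 = none := by
        rw [PySem.Dict.get?_eq_none_iff_not_mem_keys]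
        simpa [PySem.Dict.keys_mk] using hqes
      have hnew : ([(q.1, PySem.Dict.mk [(r, q.2)])].map (fun e => match (PySem.Dict.mk es).get? e.1 with
          | some v => (e.1, PySem.Dict.mk (e.2.items ++ [(r, v)]))
          | none => e)) = [(q.1, PySem.Dict.mk [(r, q.2)])] := by
        simp [hnone]
      rw [hnew]
      have hfilt : es.filter (fun q' => !(pvStep r dd q).contains q'.1)
          = es.filter (fun q' => !dd.contains q'.1) := by
        apply List.filter_congr
        intro x hx
        have hne : x.1 ≠ q.1 := fun he => hqes (he ▸ List.mem_map_of_mem hx)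
        rw [pvStep, PySem.Dict.contains_insert]
        simp [hne]
      rw [hfilt, List.filter_cons_of_pos (by simp [hc])]
      have hmap : dd.items.map (fun e => match (PySem.Dict.mk (q :: es)).get? e.1 with
          | some v => (e.1, PySem.Dict.mk (e.2.items ++ [(r, v)]))
          | none => e)
          = dd.items.map (fun e => match (PySem.Dict.mk es).get? e.1 with
          | some v => (e.1, PySem.Dict.mk (e.2.items ++ [(r, v)]))
          | none => e) := by
        apply List.map_congr_left
        intro p hp
        have hne : p.1 ≠ q.1 := by
          intro he
          exact hknotmem (he ▸ (by simpa [PySem.Dict.keys] using List.mem_map_of_mem (f := Prod.fst) hp))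
        rcases q with ⟨qk, qv⟩
        rw [PySem.Dict.get?_mk_cons, if_neg (by simpa using Ne.symm hne)]
      rw [hmap]
      simp [List.map_cons, List.append_assoc]

lemma pvStepA_eq (r : String) (rec : List (String × Int)) (dd : PySem.Dict String (PySem.Dict String Int)) (q : String × Int) :
    (let dd' := if dd.contains q.1 = false then dd.insert q.1 (PySem.Dict.mk []) else dd
     dd'.insert q.1 ((dd'.getD q.1 (PySem.Dict.mk [])).insert r ((PySem.Dict.mk rec).getD q.1 0)))
    = dd.insert q.1 ((dd.getD q.1 (PySem.Dict.mk [])).insert r ((PySem.Dict.mk rec).getD q.1 0)) := by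
  cases hc : dd.contains q.1 with
  | false =>
    simp only [if_true]
    rw [PySem.Dict.getD_insert_self, PySem.Dict.insert_insert_self,
        PySem.Dict.getD_of_not_contains dd _ hc]
  | true => simp

lemma pvOuter (rbd : List (String × List (String × Int))) :
    (rbd.map Prod.fst).Nodup → (∀ p ∈ rbd, (p.2.map Prod.fst).Nodup) →
    rbd.foldl (fun dd p =>
      p.2.foldl (fun dd q =>
        let dd := if dd.contains q.1 = false then dd.insert q.1 (PySem.Dict.mk []) else dd
        dd.insert q.1 ((dd.getD q.1 (PySem.Dict.mk [])).insert p.1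
          ((PySem.Dict.mk p.2).getD q.1 0))) dd)
      (PySem.Dict.mk []) = pvD rbd := by
  induction rbd using List.reverseRecOn with
  | nil => intro _ _; rfl
  | append_singleton rs p ih =>
    intro h1 h2
    rw [List.map_append, List.nodup_append] at h1
    obtain ⟨ha, -, hdisj⟩ := h1
    have hp1 : p.1 ∉ rs.map Prod.fst := fun hm => hdisj p.1 hm p.1 (by simp) rfl
    have hpnodup : (p.2.map Prod.fst).Nodup := h2 p (by simp)
    rw [List.foldl_append, ih ha (fun x hx => h2 x (by simp [hx])), List.foldl_cons, List.foldl_nil]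
    -- resolve the record lookup: for q ∈ p.2, records_by_date[p.1][q.1] = q.2
    have hcong : List.foldl (fun dd q =>
        let dd := if dd.contains q.1 = false then dd.insert q.1 (PySem.Dict.mk []) else dd
        dd.insert q.1 ((dd.getD q.1 (PySem.Dict.mk [])).insert p.1
          ((PySem.Dict.mk p.2).getD q.1 0))) (pvD rs) p.2
        = List.foldl (pvStep p.1) (pvD rs) p.2 := by
      apply PySem.List.foldl_congr_mem
      intro acc q hq
      rw [pvStepA_eq]
      have : (PySem.Dict.mk p.2).getD q.1 0 = q.2 := by
        rcases q with ⟨qk, qv⟩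
        exact PySem.Dict.getD_of_mem_items _ (by simpa using hq) (by simpa [PySem.Dict.keys_mk] using hpnodup) 0
      rw [this, pvStep]
    rw [hcong]
    -- freshness of p.1 inside every inner dict built from rs
    have hfresh : ∀ e ∈ (pvD rs).items, e.1 ∈ p.2.map Prod.fst → e.2.contains p.1 = false := by
      intro e he _
      obtain ⟨d, hd, rfl⟩ := List.mem_map.mp he
      rw [PySem.Dict.contains]
      rw [List.any_eq_false]
      intro x hx
      obtain ⟨p', hp', hsome⟩ := List.mem_filterMap.mp hx
      obtain ⟨v, -, rfl⟩ := Option.map_eq_some_iff.mp hsome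
      have : p'.1 ∈ rs.map Prod.fst := List.mem_map_of_mem hp'
      simp only [beq_iff_eq]
      exact fun he' => hp1 (he' ▸ this)
    apply PySem.Dict.ext
    rw [pvInner_items p.1 p.2 (pvD rs) hpnodup ((pvKeys_pvD rs) ▸ PySem.List.nodup_dedup _) hfresh]
    show _ = List.map _ (pvDates (rs ++ [p]))
    rw [pvDates_append rs p hpnodup, List.map_append]
    congr 1
    · -- existing dates
      show List.map _ ((pvDates rs).map (fun d => (d, PySem.Dict.mk (pvRows rs d)))) = _
      rw [List.map_map]
      apply List.map_congr_left
      intro d _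
      cases h : (PySem.Dict.mk p.2).get? d <;>
        simp [Function.comp, h, pvRows_append rs p d]
    · -- new dates
      rw [List.filter_map]
      rw [List.map_map]
      have hfc : p.2.filter (fun q => !(pvD rs).contains q.1)
          = p.2.filter (fun q => !(pvDates rs).contains q.1) := by
        apply List.filter_congr
        intro x _
        rw [pvContains_pvD]
      rw [hfc]
      apply List.map_congr_left
      intro q hq
      obtain ⟨hqmem, hqc⟩ := List.mem_filter.mp hq
      have hnotmem : q.1 ∉ pvDates rs := by
        simp only [Bool.not_eq_true'] at hqc
        intro hm
        rw [← List.contains_iff_mem, hqc] at hm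
        cases hm
      have hrows0 : pvRows rs q.1 = [] := pvRows_nil_of_not_mem rs q.1 hnotmem
      have hsome : (PySem.Dict.mk p.2).get? q.1 = some q.2 := by
        rcases q with ⟨qk, qv⟩
        exact PySem.Dict.get?_of_mem_items _ (by simpa using hqmem) (by simpa [PySem.Dict.keys_mk] using hpnodup)
      simp [Function.comp, pvRows_append rs p q.1, hrows0, hsome]

-- ===== VERDICT (by name: the statement is the Claim_ definition above) =====
theorem build_csv_dict_spec : Claim_equal_build_csv_dict := by
  intro rbd _ hpre
  unfold Spec_build_csv_dict
  symm
  simp only [build_csv_dict, build_csv_dict_alt]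
  rw [pvOuter rbd hpre.1 hpre.2]
  simp only [pvD, List.map_map]
  rfl
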